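/- GENERATED by mk_final_copies.py from the proof of the farm's unit `start_decoder.R13` (farm:start_decoder.R13.1: Proof.lean) as the
   re-elaboration sweep compiled it — do not edit. -/
import Asan.CheckWalk
import Vorbis.Spec.StartDecoderBTest
import Vorbis.Spec.Units.start_decoder_R13
import Vorbis.Spec.Worked.start_decoder_R13_Lemmas

open X86 X86.User Asan Vorbis Vorbis.Spec Vorbis.Spec.StartDecoder

set_option maxRecDepth 4000
set_option maxHeartbeats 4000000

namespace Vorbis.Spec.start_decoder_R13

/-- Segment R13 of `start_decoder` (0x115f67 … 0x115f92; stb_vorbis_fixed.c 4143, 4154 – 4158): the head of the mode loop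
`cmp [f + 1E0H], r14d ; jg 11655f` (exit to R14 with `i < mode_count`), else `flush_packet(f)`, the checked store
`f->previous_length = 0`, `r14d = [rsp + 24H]` (the literal 0) and the exit to R15. The walk is over the registers of the entry
state `g.e` (`rsp = g.e.rsp − 1480`, `rbp = g.e.rdi`); the two exit assertions are built by `exit_R14` / `exit_R15` of Lemmas.lean. -/
theorem segment_R13 : Vorbis.Spec.start_decoder_R13.Statement := by
  intro Lay hLay μ hμ u₀ hcode h_flush hstore4 g i v hat
  -- 1. the assertion, the callee's contract for this activation's ghosts, the entry state's facts
  obtain ⟨A, hb⟩ := hat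
  obtain ⟨hfr, hhand, hmid, hrbp, hr14, hile, hmodes⟩ := hb
  have hflush := h_flush A.2 g.frames' (g.Blk A) g.len
  have he := hfr.entry
  v_entry he
  simp only [depth] at he_room he_stack
  have hRdef : g.R = (g.e.reg .rsp).toNat - 1480 := rfl
  have hRAdef : g.RA = (g.e.reg .rsp).toNat := rfl
  have hfdef : g.f = (g.e.reg .rdi).toNat := rfl
  -- where `*f` is: one arithmetic fact per question the walk asks
  obtain ⟨hw1, hw2, hw3, hw4⟩ := obj_where hfr hhand hmid
  rw [hRAdef] at hw3
  rw [hfdef] at hw1 hw2 hw3 hw4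
  have hi64 : i ≤ 64 := by
    have h1 := hmodes.MD1
    omega
  -- 2. the present state under the names the walker reads, over the entry state's registers
  have hRw : addr g.R = g.e.reg .rsp - 1480 := by
    have e := addr_sub_lit (g.e.reg .rsp).toNat 1480 (by omega)
    rw [addr_toNat] at e
    rw [hRdef]
    exact e.symm
  have w_rip := hfr.rip
  have b_rsp : v.reg .rsp = g.e.reg .rsp - 1480 := by
    rw [hfr.rsp, hRw]
  have b_rbp : v.reg .rbp = g.e.reg .rdi := by
    rw [hrbp, hfdef, addr_toNat]
  have b_r14 := hr14
  have hrbp0 : addr g.f = g.e.reg .rdi := by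
    rw [hfdef, addr_toNat]
  clear hrbp hr14
  have w_eq : Mem.EqOn Vorbis.L.textLo Vorbis.L.textHi u₀.mem v.mem := hfr.code
  have hdf : v.flags .df = false := (show abiInv _ from hfr.inv).1
  have hmx : v.mxcsr &&& 0x1F80 = 0x1F80 := (show abiInv _ from hfr.inv).2
  have hsse := Vorbis.sseOK_of_abiInv hfr.inv
  -- 3. the two loads of the segment: `f->mode_count` (0x115f67) and the literal 0 in `[rsp + 24H]` (0x115f92: Z24)
  have r480 : v.mem.readLE (g.e.reg .rdi + 480) 4 = v.mem.u32 (g.f + 480) := by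
    rw [← addr_toNat (g.e.reg .rdi), ← hfdef]
    simp only [vfield]
  have hz00 : v.mem.readLE (g.e.reg .rsp - 1444) 4 = 0 := by
    have e : g.e.reg .rsp - 1444 = addr (g.R + 0x24) := by
      apply eq_addr
      rw [hRdef]
      u_omega
    rw [e]
    exact hmid.consts.z24 (by decide) (by decide)
  -- 4. the walk: 0x115f67 `cmp`, `jg`; 0x115f74 `mov rdi, rbp ; call flush_packet`
  u_walk hcode [hμ.vendor] until [Vorbis.L.start_decoder.cut311, Vorbis.L.start_decoder.cut274] span [Vorbis.L.textLo, Vorbis.L.textHi] side (v_side)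
  case call_inv => v_inv
  case pre_115f77 =>
    -- `ReaderPre` of flush_packet: the shadow clause, the memory-independent `ReaderEnv`, `Bits` over the pushed return address
    have hun : ShadowUntouched v.mem s_115f77.mem := by v_untouched
    have hrdi : (s_115f77.reg .rdi).toNat = g.f := by
      rw [w_rdi]
      exact hfdef.symm
    refine ⟨shadowPre_call hfr ?_ hun, ?_, ?_⟩
    · rw [w_rsp, hRdef]
      u_omega
    · rw [hrdi]
      exact readerEnv_mid hhand hmid
    · rw [hrdi, w_mem]
      refine (Vorbis.Spec.Reader.store_off_obj hmid.bits _ 8 _ ?_ ?_).1.bits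
      · u_omega
      · rw [hfdef]
        u_omega
  · -- 5a. 0x11655f, the exit to R14: `jg` taken, `i < mode_count`; nothing was stored
    refine ReachVia.done (Or.inl ?_)
    have hlt : (i : Int) < stb_vorbis.mode_count v.mem g.f := by
      rw [cmp_counter i hi64, cmp_field] at hbr_115f6e
      exact hbr_115f6e
    refine exit_R14 hfr hhand hmid ?_ b_r14 hile hmodes hlt w_rip (w_kept.get .rsp rfl) (w_kept.get .rbp rfl)
      (w_kept.get .r14 rfl) ?_ w_mem
    · rw [b_rbp, hrbp0]
    · v_inv
  · -- 0x115f7c, after flush_packet: the footprint so far over the memory at the loop head, the literal-0 slot through it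
    v_after_call w_rsp_115f77 w_mem_115f77
    simp only [w_rdi_115f77] at w_same
    have hpost : FlushPost (g.Blk A) g.len (s_115f77.reg .rdi).toNat s_115f77 s_115f77r := w_post
    rw [w_rdi_115f77, ← hfdef] at hpost
    have hsame : Mem.SameExcept
        [⟨(g.e.reg .rsp).toNat - 1760, (g.e.reg .rsp).toNat - 1480⟩,
         ⟨(g.e.reg .rdi).toNat + 48, (g.e.reg .rdi).toNat + 56⟩, ⟨(g.e.reg .rdi).toNat + 84, (g.e.reg .rdi).toNat + 96⟩,
         ⟨(g.e.reg .rdi).toNat + 136, (g.e.reg .rdi).toNat + 144⟩, ⟨(g.e.reg .rdi).toNat + 1484, (g.e.reg .rdi).toNat + 1749⟩,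
         ⟨(g.e.reg .rdi).toNat + 1752, (g.e.reg .rdi).toNat + 1764⟩, ⟨(g.e.reg .rdi).toNat + 1772, (g.e.reg .rdi).toNat + 1784⟩,
         ⟨(g.e.reg .rdi).toNat + 1256, (g.e.reg .rdi).toNat + 1260⟩]
        v.mem s_115f77r.mem := by
      u_same
    have hun : ShadowUntouched v.mem s_115f77r.mem := by v_untouched
    have hz : s_115f77r.mem.readLE (g.e.reg .rsp - 1444) 4 = 0 := by
      u_frame hz00
    clear w_same
    -- 0x115f7c `lea rdi, [rbp + 4E8H] ; call __asan_store4_noabort ; mov dword [rbp + 4E8H], 0 ; mov r14d, [rsp + 24H]`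
    u_walk hcode [hμ.vendor] until [Vorbis.L.start_decoder.cut311, Vorbis.L.start_decoder.cut274] span [Vorbis.L.textLo, Vorbis.L.textHi] side (v_side)
    · -- the check of `f->previous_length = 0` (0x115f83): a field of `*f`, inside ONE live object
      have hun' : ShadowUntouched v.mem s_115f83.mem := by v_untouched
      have hobj : LiveIn A.2 g.frames' g.f Off.sizeof.stb_vorbis := hhand.obj.mono (frames'_sub g A.2)
      refine hobj.accSmall hfr.shadow hun' _ 4 (by decide) ?_ ?_
      · rw [hfdef]
        u_omega
      · simp only [Off.sizeof.stb_vorbis]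
        rw [hfdef]
        u_omega
    · -- 5b. 0x115f97, the exit to R15: the loop is left (`mode_count ≤ i`), SD.9, `previous_length = 0`, `r14d = 0`
      refine ReachVia.done (Or.inr ?_)
      have hge : stb_vorbis.mode_count v.mem g.f ≤ (i : Int) := by
        rw [cmp_counter i hi64, cmp_field] at hbr_115f6e
        omega
      have hS : Mem.SameExcept
          [⟨(g.e.reg .rsp).toNat - 1760, (g.e.reg .rsp).toNat - 1480⟩,
           ⟨(g.e.reg .rdi).toNat + 48, (g.e.reg .rdi).toNat + 56⟩, ⟨(g.e.reg .rdi).toNat + 84, (g.e.reg .rdi).toNat + 96⟩,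
           ⟨(g.e.reg .rdi).toNat + 136, (g.e.reg .rdi).toNat + 144⟩, ⟨(g.e.reg .rdi).toNat + 1484, (g.e.reg .rdi).toNat + 1749⟩,
           ⟨(g.e.reg .rdi).toNat + 1752, (g.e.reg .rdi).toNat + 1764⟩, ⟨(g.e.reg .rdi).toNat + 1772, (g.e.reg .rdi).toNat + 1784⟩,
           ⟨(g.e.reg .rdi).toNat + 1256, (g.e.reg .rdi).toNat + 1260⟩]
          v.mem s_115f92.mem := by
        rw [w_mem]
        u_same
      refine exit_R15 hfr hhand hmid hmodes hge w_rip ?_ ?_ ?_ ?_ w_eq hpost.reader.bits w_mem ?_ ?_ hS ?_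
      · -- rsp is the steady stack pointer again
        rw [w_rsp, hRw]
      · -- rbp = f: callee-saved, never written
        rw [w_kept.get .rbp rfl, b_rbp, hrbp0]
      · -- r14d = the literal 0
        rw [w_r14]
        rfl
      · v_inv
      · -- the return address of the check call: in the own stack, below the steady stack pointer
        rw [hRAdef, hRdef]
        constructor
        · u_omega
        · u_omega
      · -- the address of the store
        rw [← addr_add_lit, hrbp0]
      · -- every window is `OffWin`
        intro w hw
        simp only [List.mem_cons, List.mem_nil_iff, or_false] at hw
        unfold OffWin
        rw [hRdef, hRAdef, hfdef]
        rcases hw with rfl | rfl | rfl | rfl | rfl | rfl | rfl | rfl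
        all_goals
          simp only []
          omega

end Vorbis.Spec.start_decoder_R13

theorem Vorbis.Spec.Worked.start_decoder_R13_ok : Vorbis.Spec.start_decoder_R13.Statement :=
  Vorbis.Spec.start_decoder_R13.segment_R13
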